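-- pv_equiv track=rewrite | github.com/QATCH-Technologies/nanovisQ | QATCH/QModel/src/models/static_v4/qmodel_v4_predictor.py | validate_predictions
-- ===== SOURCE A (Python) =====
-- from typing import Dict, List, Tuple, Optional, Union
--
-- def validate_predictions(predictions: Dict[str, Dict[str, List]]) -> bool:
--     """Validates that predicted POIs follow all defined constraints.
--
--     This method checks:
--         - POI3 always has placeholder values `[-1]`.
--         - Sequential dependencies between POIs are satisfied:
--             * POI4 must occur after POI1 and POI2.
--             * POI5 must occur after POI4.
--             * POI6 must occur after POI5.
--
--     Args:
--         predictions (Dict[str, Dict[str, List]]): Dictionary of final POI predictions.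
--             Each key is a POI label (e.g., 'POI1') and each value contains:
--                 - 'indices': List[int] of predicted indices.
--                 - 'confidences': List[float] of prediction confidences.
--
--     Returns:
--         bool: True if predictions satisfy all constraints, False otherwise.
--     """
--     # Check POI3 is always -1
--     if "POI3" in predictions:
--         if predictions["POI3"]["indices"] != [-1] or predictions["POI3"]["confidences"] != [-1]:
--             return False
--
--     # Check sequential constraints
--     poi_indices = {}
--     for poi_name, data in predictions.items():
--         if poi_name != "POI3" and data["indices"][0] != -1:
--             poi_num = int(poi_name.replace("POI", ""))
--             poi_indices[poi_num] = data["indices"][0]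
--
--     # Validate dependencies
--     if 4 in poi_indices:
--         if 1 not in poi_indices or 2 not in poi_indices:
--             return False
--         if poi_indices[4] <= poi_indices[2]:
--             return False
--
--     if 5 in poi_indices:
--         if 4 not in poi_indices:
--             return False
--         if poi_indices[5] <= poi_indices[4]:
--             return False
--
--     if 6 in poi_indices:
--         if 5 not in poi_indices:
--             return False
--         if poi_indices[6] <= poi_indices[5]:
--             return False
--
--     return True
-- ===== SOURCE B (Python) =====
-- def validate_predictions(predictions):
--     # Chain-based validation: instead of three hard-coded dependency branches,
--     # find the highest dependent POI h in {4,5,6}, take the prefix of the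
--     # dependency chain [2,4,5,6] up to h, require it (plus POI1) fully present,
--     # and check the chain's indices are strictly increasing pairwise.
--     p3 = predictions.get("POI3")
--     if p3 is not None and (p3["indices"] != [-1] or p3["confidences"] != [-1]):
--         return False
--
--     idx = {}
--     for name, data in predictions.items():
--         if name != "POI3" and data["indices"][0] != -1:
--             idx[int(name.replace("POI", ""))] = data["indices"][0]
--
--     h = max((k for k in (4, 5, 6) if k in idx), default=3)
--     if h == 3:
--         return True
--     chain = [2, 4, 5, 6][: h - 2]
--     if 1 not in idx or any(c not in idx for c in chain):
--         return False
--     seq = [idx[c] for c in chain]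
--     return all(a < b for a, b in zip(seq, seq[1:]))
-- ===== Notes on version B (the rewrite author's own statement) =====
-- stated objective: alternative
-- what changed: B replaces A's three hard-coded dependency branches by a different formulation: it computes the highest dependent POI h in {4,5,6}, takes the matching prefix of the dependency chain [2,4,5,6], and validates by requiring that prefix (plus POI1) present and its indices pairwise strictly increasing (faithfully keeping A's rule that POI4 requires both 1 and 2 present but compares only against POI2).
import Mathlib
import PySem

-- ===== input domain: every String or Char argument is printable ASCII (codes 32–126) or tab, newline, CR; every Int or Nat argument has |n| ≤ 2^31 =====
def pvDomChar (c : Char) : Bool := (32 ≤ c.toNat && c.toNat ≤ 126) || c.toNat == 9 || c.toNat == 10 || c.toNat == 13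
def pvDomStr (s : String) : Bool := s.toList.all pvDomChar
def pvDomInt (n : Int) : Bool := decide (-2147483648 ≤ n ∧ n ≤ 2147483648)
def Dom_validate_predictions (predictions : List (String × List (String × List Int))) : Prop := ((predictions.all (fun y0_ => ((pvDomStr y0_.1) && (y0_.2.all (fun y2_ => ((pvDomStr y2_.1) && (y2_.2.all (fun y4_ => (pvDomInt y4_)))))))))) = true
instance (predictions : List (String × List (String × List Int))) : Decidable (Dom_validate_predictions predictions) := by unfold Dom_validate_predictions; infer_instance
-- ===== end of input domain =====

-- B replaces A's three hard-coded dependency branches by finding the highest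
-- dependent POI, taking the matching prefix of the chain [2,4,5,6], and checking
-- presence plus pairwise strict increase along it (objective: alternative).

-- shared input decoding: the Python function receives a dict of dicts
def pvToDict (predictions : List (String × List (String × List Int))) :
    PySem.Dict String (PySem.Dict String (List Int)) :=
  PySem.Dict.ofList (predictions.map (fun p => (p.1, PySem.Dict.ofList p.2)))

-- int(name.replace("POI", "")); default irrelevant: Pre_ excludes the ValueError
def pvPoiNum (name : String) : Int :=
  (PySem.Int.ofStr? (PySem.Str.replace name "POI" "")).getD 0

-- data["indices"][0]; defaults only reachable outside Pre_ (KeyError/IndexError)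
def pvA_first (data : PySem.Dict String (List Int)) : Int :=
  PySem.List.pyGetD (data.getD "indices" []) 0 (-1)

-- the poi-number -> first-index loop (this loop is verbatim the same in A and B)
def pvBuildPoi (d : PySem.Dict String (PySem.Dict String (List Int))) : PySem.Dict Int Int :=
  d.items.foldl (fun acc pr =>
    if pr.1 != "POI3" && pvA_first pr.2 != -1 then
      acc.insert (pvPoiNum pr.1) (pvA_first pr.2)
    else acc) PySem.Dict.empty

-- ===== PORT A =====
def pvA_check6 (poi : PySem.Dict Int Int) : Bool :=
  if poi.contains 6 then
    if !(poi.contains 5) then false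
    else if decide (poi.getD 6 0 ≤ poi.getD 5 0) then false
    else true
  else true

def pvA_check5 (poi : PySem.Dict Int Int) : Bool :=
  if poi.contains 5 then
    if !(poi.contains 4) then false
    else if decide (poi.getD 5 0 ≤ poi.getD 4 0) then false
    else pvA_check6 poi
  else pvA_check6 poi

def pvA_seq (d : PySem.Dict String (PySem.Dict String (List Int))) : Bool :=
  let poi := pvBuildPoi d
  if poi.contains 4 then
    if !(poi.contains 1) || !(poi.contains 2) then false
    else if decide (poi.getD 4 0 ≤ poi.getD 2 0) then false
    else pvA_check5 poi
  else pvA_check5 poi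

def validate_predictions (predictions : List (String × List (String × List Int))) : Bool :=
  let d := pvToDict predictions
  match d.get? "POI3" with
  | some p3 =>
      if !(p3.getD "indices" [] == [-1]) || !(p3.getD "confidences" [] == [-1]) then false
      else pvA_seq d
  | none => pvA_seq d

-- ===== PORT B =====
-- max((k for k in (4,5,6) if k in idx), default=3): all candidates exceed 3,
-- so a fold of `max` starting from the default is exact here
def pvB_check (d : PySem.Dict String (PySem.Dict String (List Int))) : Bool :=
  let idx := pvBuildPoi d
  let h : Int := (([4, 5, 6] : List Int).filter (fun k => idx.contains k)).foldl max 3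
  if h == 3 then true
  else
    -- chain[: h-2] with h ∈ {4,5,6}: a nonnegative slice-to is List.take
    let chain := ([2, 4, 5, 6] : List Int).take (h - 2).toNat
    if !(idx.contains 1) || chain.any (fun c => !(idx.contains c)) then false
    else
      let seq := chain.map (fun c => idx.getD c 0)
      (seq.zip seq.tail).all (fun p => decide (p.1 < p.2))

def validate_predictions_alt (predictions : List (String × List (String × List Int))) : Bool :=
  let d := pvToDict predictions
  let p3bad : Bool :=
    match d.get? "POI3" with
    | some p3 => !(p3.getD "indices" [] == [-1]) || !(p3.getD "confidences" [] == [-1])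
    | none => false
  if p3bad then false else pvB_check d

-- ===== PRECONDITION & SPEC =====
-- Pre_ excludes exactly the inputs where A raises: a POI3 entry missing the
-- 'indices' key (or, when its indices equal [-1], the 'confidences' key); and,
-- when the POI3 placeholder check passes, any other entry whose data lacks a
-- nonempty 'indices' list (KeyError/IndexError) or whose name does not parse
-- as an int after removing 'POI' (ValueError) while its first index is not -1.
def pvPreB (predictions : List (String × List (String × List Int))) : Bool :=
  let d := pvToDict predictions
  let p3noRaise : Bool :=
    match d.get? "POI3" with
    | some p3 => p3.contains "indices" && (!(p3.getD "indices" [] == [-1]) || p3.contains "confidences")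
    | none => true
  let p3pass : Bool :=
    match d.get? "POI3" with
    | some p3 => (p3.getD "indices" [] == [-1]) && (p3.getD "confidences" [] == [-1])
    | none => true
  let loopOk : Bool :=
    d.items.all (fun pr =>
      pr.1 == "POI3" ||
      (pr.2.contains "indices" && !(pr.2.getD "indices" []).isEmpty &&
        (pvA_first pr.2 == -1 || (PySem.Int.ofStr? (PySem.Str.replace pr.1 "POI" "")).isSome)))
  p3noRaise && (!p3pass || loopOk)

def Pre_validate_predictions (predictions : List (String × List (String × List Int))) : Prop :=
  pvPreB predictions = true
instance (predictions : List (String × List (String × List Int))) : Decidable (Pre_validate_predictions predictions) := by unfold Pre_validate_predictions; infer_instance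

def pvWitness_validate_predictions : (List (String × List (String × List Int))) :=
  [("POI1", [("indices", [3]), ("confidences", [1])]),
   ("POI3", [("indices", [-1]), ("confidences", [-1])])]

def Spec_validate_predictions (predictions : List (String × List (String × List Int))) (out : Bool) : Prop := out = validate_predictions_alt predictions
instance (predictions : List (String × List (String × List Int))) (out : Bool) : Decidable (Spec_validate_predictions predictions out) := by unfold Spec_validate_predictions; infer_instance

-- ===== CLAIM (what is proved, stated in full; the proofs are below) =====
def Claim_equal_validate_predictions : Prop := ∀ (predictions : List (String × List (String × List Int))), Dom_validate_predictions predictions → Pre_validate_predictions predictions → Spec_validate_predictions predictions (validate_predictions predictions)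

-- ===== LEMMAS AND PROOFS =====

-- A's unrolled dependency branches equal B's highest-POI chain check
theorem pv_branches_eq_chain (d : PySem.Dict String (PySem.Dict String (List Int))) :
    pvA_seq d = pvB_check d := by
  unfold pvA_seq pvB_check
  set poi := pvBuildPoi d
  simp only [pvA_check5, pvA_check6, List.filter]
  cases h4 : poi.contains 4 <;> cases h5 : poi.contains 5 <;> cases h6 : poi.contains 6 <;>
    cases h1 : poi.contains 1 <;> cases h2 : poi.contains 2 <;>
    simp [h2, h4, h5, h6, ← decide_not]

-- ===== VERDICT (by name: the statement is the Claim_ definition above) =====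
theorem validate_predictions_spec : Claim_equal_validate_predictions := by
  intro predictions _ _
  unfold Spec_validate_predictions validate_predictions validate_predictions_alt
  cases h : (pvToDict predictions).get? "POI3" with
  | none => simp [h, pv_branches_eq_chain]
  | some p3 =>
      by_cases hb : (!(p3.getD "indices" [] == [-1]) || !(p3.getD "confidences" [] == [-1])) = true
      · simp [h, hb]
      · rw [Bool.not_eq_true] at hb
        simp [h, hb, pv_branches_eq_chain]
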